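-- pv_equiv track=rewrite | github.com/cheonyeji/algorithm_study | 이코테/이진탐색/q30_가사검색.py | find_keyword_EndQuestionmark
-- ===== SOURCE A (Python) =====
-- def first_keyword(array, target, start, end):
--     target_textLen = len(target)
--     if start > end:
--         return None
--     mid = (start + end) // 2
--     # 여기에서 find메서드를 사용해서는 안되고 정확한 익덱스번쨰에 있는지를 체크해야 한다!
--     # find메서드 사용시 문자열에 존재하기만 하면 true (원래는 find써서 테스트케이스 통과 실패)
--     if (
--         mid == 0 or array[mid - 1][0:target_textLen] != target[0:target_textLen]
--     ) and array[mid][0:target_textLen] == target[0:target_textLen]: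
--         return mid
--     elif array[mid][0:target_textLen] >= target[0:target_textLen]:  # 왼쪽에서 문자열 찾기
--         return first_keyword(array, target, start, mid - 1)
--     else:
--         return first_keyword(array, target, mid + 1, end)
--
-- def last_keyword(array, target, start, end):
--     target_textLen = len(target)
--     if start > end:
--         return None
--     mid = (start + end) // 2
--     if (
--         mid == len(array) - 1
--         or array[mid + 1][0:target_textLen] != target[0:target_textLen]
--     ) and array[mid][0:target_textLen] == target[0:target_textLen]:
--         return mid
--     elif array[mid][0:target_textLen] > target[0:target_textLen]:
--         return last_keyword(array, target, start, mid - 1)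
--     else:
--         return last_keyword(array, target, mid + 1, end)
--
-- def find_keyword_EndQuestionmark(array, target):
--     # ?가 접미사로 붙는 경우
--     n = len(array)
--     target_notQuestionmark = ""
--     for i in target:
--         if i != "?":
--             target_notQuestionmark += i
--
--     first_idx = first_keyword(array, target_notQuestionmark, 0, n - 1)
--
--     if first_idx == None:
--         return 0  # 매치되는 단어 0
--
--     last_idx = last_keyword(array, target_notQuestionmark, 0, n - 1)
--
--     return last_idx - first_idx + 1
-- ===== SOURCE B (Python) =====
-- def find_keyword_EndQuestionmark(array, target):
--     # Linear count: entries matching the non-'?' prefix of target.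
--     prefix = ''.join(c for c in target if c != '?')
--     L = len(prefix)
--     return sum(1 for w in array if w[:L] == prefix)
-- ===== Notes on version B (the rewrite author's own statement) =====
-- stated objective: simpler
-- what changed: B drops A's two recursive binary searches (first/last matching index, then subtraction) and directly counts the entries whose first len(prefix) characters equal the non-'?' prefix in one linear pass.
-- outside the precondition, e.g. on find_keyword_EndQuestionmark(['a', 'b', 'a'], 'a'): A returns 1, B returns 2; on find_keyword_EndQuestionmark(['aa', 'b', 'aab', 'aa', '', 'ba'], 'a?'): A raises TypeError, B returns 3
import Mathlib
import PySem

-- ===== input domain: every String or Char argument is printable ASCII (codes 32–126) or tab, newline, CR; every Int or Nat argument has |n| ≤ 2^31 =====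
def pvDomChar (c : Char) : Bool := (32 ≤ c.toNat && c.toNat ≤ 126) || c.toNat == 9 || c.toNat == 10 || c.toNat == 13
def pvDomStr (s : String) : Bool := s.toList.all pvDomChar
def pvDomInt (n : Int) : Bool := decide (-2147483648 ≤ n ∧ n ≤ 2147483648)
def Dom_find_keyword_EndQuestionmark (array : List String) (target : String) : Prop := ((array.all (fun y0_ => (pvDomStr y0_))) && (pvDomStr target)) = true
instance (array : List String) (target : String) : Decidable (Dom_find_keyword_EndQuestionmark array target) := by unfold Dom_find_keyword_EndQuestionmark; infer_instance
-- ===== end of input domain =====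

-- B replaces A's pair of recursive binary searches by a single linear count of the
-- entries matching the non-'?' prefix (objective: simpler; equal to A on Pre_).

-- ===== PORT A =====
-- array[i][0:tlen] : string slice of an element.  'array[mid]' is in range on every call
-- the entry function makes (0 ≤ start ≤ mid ≤ e ≤ len-1), so Python never raises here;
-- the .getD "" default is unreachable from the entry.
def pvSliceAt (array : List String) (i : Int) (tlen : Int) : List Char :=
  PySem.List.slice ((PySem.List.pyGet? array i).getD "").toList (some 0) (some tlen)

-- first_keyword(array, target, start, end)
def first_keyword (array : List String) (target : String) (start : Int) (e : Int) : Option Int :=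
  let target_textLen : Int := PySem.Str.len target
  if start > e then none
  else
    let mid : Int := PySem.Int.floordiv (start + e) 2
    -- target[0:target_textLen]
    let tsl : List Char := PySem.List.slice target.toList (some 0) (some target_textLen)
    if (mid = 0 ∨ pvSliceAt array (mid - 1) target_textLen ≠ tsl) ∧
        pvSliceAt array mid target_textLen = tsl then
      some mid
    else if tsl ≤ pvSliceAt array mid target_textLen then  -- array[mid][0:L] >= target[0:L]
      first_keyword array target start (mid - 1)
    else
      first_keyword array target (mid + 1) e
termination_by (e - start + 1).toNat
decreasing_by
  all_goals
    have hb := PySem.Int.floordiv_two_mid_bounds (show start ≤ e by omega)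
    omega

-- last_keyword(array, target, start, end)
def last_keyword (array : List String) (target : String) (start : Int) (e : Int) : Option Int :=
  let target_textLen : Int := PySem.Str.len target
  if start > e then none
  else
    let mid : Int := PySem.Int.floordiv (start + e) 2
    let tsl : List Char := PySem.List.slice target.toList (some 0) (some target_textLen)
    if (mid = (array.length : Int) - 1 ∨ pvSliceAt array (mid + 1) target_textLen ≠ tsl) ∧
        pvSliceAt array mid target_textLen = tsl then
      some mid
    else if tsl < pvSliceAt array mid target_textLen then  -- array[mid][0:L] > target[0:L]
      last_keyword array target start (mid - 1)
    else
      last_keyword array target (mid + 1) e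
termination_by (e - start + 1).toNat
decreasing_by
  all_goals
    have hb := PySem.Int.floordiv_two_mid_bounds (show start ≤ e by omega)
    omega

def find_keyword_EndQuestionmark (array : List String) (target : String) : Int :=
  let n : Int := (array.length : Int)
  -- target_notQuestionmark built by string concatenation, kept as its character list
  let target_notQuestionmark : List Char :=
    target.toList.foldl (fun acc i => if i ≠ '?' then acc ++ [i] else acc) []
  match first_keyword array (String.ofList target_notQuestionmark) 0 (n - 1) with
  | none => 0
  | some first_idx =>
    match last_keyword array (String.ofList target_notQuestionmark) 0 (n - 1) with
    | none => 0  -- Python raises TypeError (None - int) here; such inputs are outside Pre_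
    | some last_idx => last_idx - first_idx + 1

-- ===== PORT B =====
def find_keyword_EndQuestionmark_alt (array : List String) (target : String) : Int :=
  -- ''.join(c for c in target if c != '?')
  let pfx : List Char := target.toList.filter (fun c => c ≠ '?')
  let L : Nat := pfx.length
  -- sum(1 for w in array if w[:L] == prefix); w[:L] with 0 ≤ L is take L
  ((array.countP (fun w => w.toList.take L == pfx) : Nat) : Int)

-- ===== PRECONDITION & SPEC =====
-- Pre_ excludes unsorted arrays that contain an entry matching the non-'?' prefix of
-- target: there A's binary searches return a path-dependent accidental value (and A can
-- even raise TypeError when the second search misses while the first succeeded).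
def Pre_find_keyword_EndQuestionmark (array : List String) (target : String) : Prop :=
  let pfx : List Char := target.toList.filter (fun c => c ≠ '?')
  pfx = [] ∨ (∀ w ∈ array, w.toList.take pfx.length ≠ pfx) ∨
    List.Pairwise (fun x y : String => x.toList ≤ y.toList) array
instance (array : List String) (target : String) : Decidable (Pre_find_keyword_EndQuestionmark array target) := by
  unfold Pre_find_keyword_EndQuestionmark; infer_instance

def pvWitness_find_keyword_EndQuestionmark : List String × String := (["ab", "abc", "b"], "ab?")

def Spec_find_keyword_EndQuestionmark (array : List String) (target : String) (out : Int) : Prop := out = find_keyword_EndQuestionmark_alt array target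
instance (array : List String) (target : String) (out : Int) : Decidable (Spec_find_keyword_EndQuestionmark array target out) := by unfold Spec_find_keyword_EndQuestionmark; infer_instance

-- ===== CLAIM (what is proved, stated in full; the proofs are below) =====
def Claim_equal_find_keyword_EndQuestionmark : Prop := ∀ (array : List String) (target : String), Dom_find_keyword_EndQuestionmark array target → Pre_find_keyword_EndQuestionmark array target → Spec_find_keyword_EndQuestionmark array target (find_keyword_EndQuestionmark array target)

-- ===== LEMMAS AND PROOFS =====

-- The normalised "key" of entry i : array[i][:L] (with pyGet?'s index rules).
def pvKey (array : List String) (L : Nat) (i : Int) : List Char :=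
  ((PySem.List.pyGet? array i).getD "").toList.take L

lemma pvSliceAt_eq_pvKey (array : List String) (L : Nat) (i : Int) :
    pvSliceAt array i (L : Int) = pvKey array L i := by
  unfold pvSliceAt pvKey
  rw [PySem.List.slice_zero_start, PySem.List.slice_to _ (by positivity)]
  simp

lemma pyGet?_mem {α : Type} (l : List α) (i : Int) (w : α)
    (h : PySem.List.pyGet? l i = some w) : w ∈ l := by
  unfold PySem.List.pyGet? at h
  obtain ⟨k, hk1, hk2⟩ := Option.bind_eq_some_iff.mp h
  exact List.mem_of_getElem? hk2

lemma pvKey_inrange (array : List String) (L : Nat) (i : Int) (h0 : 0 ≤ i)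
    (hn : i < (array.length : Int)) :
    pvKey array L i = (array[i.toNat]'(by omega)).toList.take L := by
  have hg : PySem.List.pyGet? array i = array[i.toNat]? := by
    rw [show i = ((i.toNat : Nat) : Int) by omega]
    exact PySem.List.pyGet?_natCast array i.toNat
  unfold pvKey
  rw [hg, List.getElem?_eq_getElem (by omega)]
  rfl

lemma pvKey_zero (array : List String) (i : Int) : pvKey array 0 i = [] := by
  unfold pvKey; simp

-- lexicographic order: truncation is monotone
lemma take_lt_of_lt (L : Nat) : ∀ (x y : List Char), x.take L < y.take L → x < y := by
  induction L with
  | zero => intro x y h; simp at h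
  | succ L ih =>
    intro x y h
    cases x with
    | nil =>
      cases y with
      | nil => simp at h
      | cons b bs => exact List.nil_lt_cons b bs
    | cons a as =>
      cases y with
      | nil => exact absurd h (List.not_lt_nil _)
      | cons b bs =>
        simp only [List.take_succ_cons, List.cons_lt_cons_iff] at h ⊢
        rcases h with h | ⟨rfl, h⟩
        · exact Or.inl h
        · exact Or.inr ⟨rfl, ih _ _ h⟩

lemma take_le_of_le (L : Nat) (x y : List Char) (h : x ≤ y) : x.take L ≤ y.take L := by
  by_contra h2
  exact absurd h (not_le.mpr (take_lt_of_lt L y x (not_le.mp h2)))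

-- sorted array ⇒ keys monotone
lemma pvKey_mono (array : List String) (L : Nat)
    (hs : List.Pairwise (fun x y : String => x.toList ≤ y.toList) array)
    (i j : Int) (h0 : 0 ≤ i) (hij : i ≤ j) (hj : j < (array.length : Int)) :
    pvKey array L i ≤ pvKey array L j := by
  rw [pvKey_inrange array L i h0 (by omega), pvKey_inrange array L j (by omega) hj]
  rcases eq_or_lt_of_le hij with rfl | hlt
  · exact le_refl _
  · exact take_le_of_le L _ _
      ((List.pairwise_iff_getElem.mp hs) i.toNat j.toNat (by omega) (by omega) (by omega))

-- one unfolding of the searches, with slices normalised to pvKey, for target = ofList p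
lemma first_base (array : List String) (t : String) (lo hi : Int) (h : lo > hi) :
    first_keyword array t lo hi = none := by
  rw [first_keyword]; simp [h]

lemma first_eq (array : List String) (p : List Char) (lo hi : Int) (h : ¬ lo > hi) :
    first_keyword array (String.ofList p) lo hi =
      (if (PySem.Int.floordiv (lo + hi) 2 = 0 ∨
            pvKey array p.length (PySem.Int.floordiv (lo + hi) 2 - 1) ≠ p) ∧
          pvKey array p.length (PySem.Int.floordiv (lo + hi) 2) = p then
        some (PySem.Int.floordiv (lo + hi) 2)
      else if p ≤ pvKey array p.length (PySem.Int.floordiv (lo + hi) 2) then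
        first_keyword array (String.ofList p) lo (PySem.Int.floordiv (lo + hi) 2 - 1)
      else
        first_keyword array (String.ofList p) (PySem.Int.floordiv (lo + hi) 2 + 1) hi) := by
  rw [first_keyword]
  have hlen : PySem.Str.len (String.ofList p) = (p.length : Int) := by
    rw [PySem.Str.len_eq, String.toList_ofList]
  have htsl : PySem.List.slice (String.ofList p).toList (some 0) (some (p.length : Int)) = p := by
    rw [String.toList_ofList, PySem.List.slice_zero_start, PySem.List.slice_to _ (by positivity)]
    simp
  simp only [hlen, htsl, if_neg h, pvSliceAt_eq_pvKey]

lemma last_eq (array : List String) (p : List Char) (lo hi : Int) (h : ¬ lo > hi) :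
    last_keyword array (String.ofList p) lo hi =
      (if (PySem.Int.floordiv (lo + hi) 2 = (array.length : Int) - 1 ∨
            pvKey array p.length (PySem.Int.floordiv (lo + hi) 2 + 1) ≠ p) ∧
          pvKey array p.length (PySem.Int.floordiv (lo + hi) 2) = p then
        some (PySem.Int.floordiv (lo + hi) 2)
      else if p < pvKey array p.length (PySem.Int.floordiv (lo + hi) 2) then
        last_keyword array (String.ofList p) lo (PySem.Int.floordiv (lo + hi) 2 - 1)
      else
        last_keyword array (String.ofList p) (PySem.Int.floordiv (lo + hi) 2 + 1) hi) := by
  rw [last_keyword]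
  have hlen : PySem.Str.len (String.ofList p) = (p.length : Int) := by
    rw [PySem.Str.len_eq, String.toList_ofList]
  have htsl : PySem.List.slice (String.ofList p).toList (some 0) (some (p.length : Int)) = p := by
    rw [String.toList_ofList, PySem.List.slice_zero_start, PySem.List.slice_to _ (by positivity)]
    simp
  simp only [hlen, htsl, if_neg h, pvSliceAt_eq_pvKey]

-- ===== case: empty prefix (L = 0) =====
lemma first_empty (array : List String) : ∀ (m : Nat) (hi : Int), hi.toNat ≤ m → 0 ≤ hi →
    first_keyword array (String.ofList []) 0 hi = some 0 := by
  intro m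
  induction m with
  | zero =>
    intro hi hm h0
    have hhi : hi = 0 := by omega
    subst hhi
    rw [first_eq _ _ _ _ (by omega)]
    norm_num [pvKey_zero]
  | succ m ih =>
    intro hi hm h0
    rw [first_eq _ _ _ _ (by omega)]
    simp only [zero_add]
    have hb := PySem.Int.floordiv_two_mid_bounds (show (0:Int) ≤ hi by omega)
    rw [zero_add] at hb
    by_cases hm0 : PySem.Int.floordiv hi 2 = 0
    · rw [if_pos ⟨Or.inl hm0, by simp [pvKey_zero]⟩, hm0]
    · rw [if_neg (by intro hc; rcases hc.1 with h | h; exact hm0 h; exact h (pvKey_zero _ _)),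
        if_pos (by simp [pvKey_zero])]
      exact ih _ (by omega) (by omega)

lemma last_empty (array : List String) : ∀ (m : Nat) (lo : Int),
    ((array.length : Int) - 1 - lo).toNat ≤ m → 0 ≤ lo → lo ≤ (array.length : Int) - 1 →
    last_keyword array (String.ofList []) lo ((array.length : Int) - 1) = some ((array.length : Int) - 1) := by
  intro m
  induction m with
  | zero =>
    intro lo hm h0 hl
    have hlo : lo = (array.length : Int) - 1 := by omega
    subst hlo
    rw [last_eq _ _ _ _ (by omega)]
    have hb := PySem.Int.floordiv_two_mid_bounds (le_refl ((array.length : Int) - 1))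
    rw [if_pos ⟨Or.inl (by omega), pvKey_zero _ _⟩]
    congr 1
    omega
  | succ m ih =>
    intro lo hm h0 hl
    rw [last_eq _ _ _ _ (by omega)]
    have hb := PySem.Int.floordiv_two_mid_bounds (show lo ≤ (array.length : Int) - 1 by omega)
    by_cases hm0 : PySem.Int.floordiv (lo + ((array.length : Int) - 1)) 2 = (array.length : Int) - 1
    · rw [if_pos ⟨Or.inl hm0, pvKey_zero _ _⟩, hm0]
    · rw [if_neg (by intro hc; rcases hc.1 with h | h; exact hm0 h; exact h (pvKey_zero _ _)),
        if_neg (by simp [pvKey_zero])]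
      exact ih _ (by omega) (by omega) (by omega)

-- ===== case: no entry matches =====
lemma first_nomatch (array : List String) (p : List Char)
    (hnm : ∀ i : Int, pvKey array p.length i ≠ p) :
    ∀ (m : Nat) (lo hi : Int), (hi - lo + 1).toNat ≤ m →
    first_keyword array (String.ofList p) lo hi = none := by
  intro m
  induction m with
  | zero => intro lo hi hm; exact first_base _ _ _ _ (by omega)
  | succ m ih =>
    intro lo hi hm
    by_cases h : lo > hi
    · exact first_base _ _ _ _ h
    · rw [first_eq _ _ _ _ h]
      have hb := PySem.Int.floordiv_two_mid_bounds (show lo ≤ hi by omega)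
      rw [if_neg (by intro hc; exact hnm _ hc.2)]
      split
      · exact ih _ _ (by omega)
      · exact ih _ _ (by omega)

-- ===== case: sorted, a match exists =====
lemma first_found (array : List String) (p : List Char) (f₀ : Nat)
    (hs : List.Pairwise (fun x y : String => x.toList ≤ y.toList) array)
    (hf : pvKey array p.length (f₀ : Int) = p)
    (hmin : ∀ k : Nat, k < f₀ → pvKey array p.length (k : Int) ≠ p)
    (hfn : (f₀ : Int) < (array.length : Int)) :
    ∀ (m : Nat) (lo hi : Int), (hi - lo).toNat ≤ m → 0 ≤ lo →
      hi ≤ (array.length : Int) - 1 → lo ≤ (f₀ : Int) → (f₀ : Int) ≤ hi →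
      first_keyword array (String.ofList p) lo hi = some (f₀ : Int) := by
  have hdis : (f₀ : Int) = 0 ∨ pvKey array p.length ((f₀ : Int) - 1) ≠ p := by
    rcases Nat.eq_zero_or_pos f₀ with h | h
    · left; omega
    · right
      rw [show (f₀ : Int) - 1 = ((f₀ - 1 : Nat) : Int) by omega]
      exact hmin _ (by omega)
  intro m
  induction m with
  | zero =>
    intro lo hi hm h0 hhi hlf hfh
    have h1 : lo = (f₀ : Int) := by omega
    have h2 : hi = (f₀ : Int) := by omega
    subst h1; subst h2
    rw [first_eq _ _ _ _ (by omega)]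
    have hb := PySem.Int.floordiv_two_mid_bounds (le_refl (f₀ : Int))
    have hmid : PySem.Int.floordiv ((f₀ : Int) + (f₀ : Int)) 2 = (f₀ : Int) := by omega
    rw [hmid, if_pos ⟨hdis, hf⟩]
  | succ m ih =>
    intro lo hi hm h0 hhi hlf hfh
    rw [first_eq _ _ _ _ (by omega)]
    have hb := PySem.Int.floordiv_two_mid_bounds (show lo ≤ hi by omega)
    set md := PySem.Int.floordiv (lo + hi) 2 with hmd
    by_cases hc : (md = 0 ∨ pvKey array p.length (md - 1) ≠ p) ∧ pvKey array p.length md = p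
    · rw [if_pos hc]
      have hmf : (f₀ : Int) ≤ md := by
        by_contra hlt
        push_neg at hlt
        have : pvKey array p.length md ≠ p := by
          rw [show md = ((md.toNat : Nat) : Int) by omega]
          exact hmin md.toNat (by omega)
        exact this hc.2
      rcases eq_or_lt_of_le hmf with heq | hlt
      · rw [← heq]
      · exfalso
        rcases hc.1 with h | hne
        · omega
        · have h1 := pvKey_mono array p.length hs (f₀ : Int) (md - 1) (by omega) (by omega) (by omega)
          have h2 := pvKey_mono array p.length hs (md - 1) md (by omega) (by omega) (by omega)
          rw [hf] at h1
          rw [hc.2] at h2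
          exact hne (le_antisymm h2 h1)
    · rw [if_neg hc]
      by_cases hg : p ≤ pvKey array p.length md
      · rw [if_pos hg]
        have hlt : (f₀ : Int) < md := by
          rcases lt_trichotomy md (f₀ : Int) with h | h | h
          · exfalso
            have hmono := pvKey_mono array p.length hs md (f₀ : Int) (by omega) (by omega) (by omega)
            rw [hf] at hmono
            have heq : pvKey array p.length md = p := le_antisymm hmono hg
            rw [show md = ((md.toNat : Nat) : Int) by omega] at heq
            exact hmin md.toNat (by omega) heq
          · exact absurd ⟨h ▸ hdis, h ▸ hf⟩ hc
          · exact h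
        exact ih lo (md - 1) (by omega) h0 (by omega) hlf (by omega)
      · rw [if_neg hg]
        have hlt : md < (f₀ : Int) := by
          by_contra hge
          push_neg at hge
          have hmono := pvKey_mono array p.length hs (f₀ : Int) md (by omega) hge (by omega)
          rw [hf] at hmono
          exact hg hmono
        exact ih (md + 1) hi (by omega) (by omega) hhi (by omega) hfh

lemma last_found (array : List String) (p : List Char) (l₀ : Nat)
    (hs : List.Pairwise (fun x y : String => x.toList ≤ y.toList) array)
    (hl : pvKey array p.length (l₀ : Int) = p)
    (hmax : ∀ k : Nat, l₀ < k → k < array.length → pvKey array p.length (k : Int) ≠ p)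
    (hln : (l₀ : Int) < (array.length : Int)) :
    ∀ (m : Nat) (lo hi : Int), (hi - lo).toNat ≤ m → 0 ≤ lo →
      hi ≤ (array.length : Int) - 1 → lo ≤ (l₀ : Int) → (l₀ : Int) ≤ hi →
      last_keyword array (String.ofList p) lo hi = some (l₀ : Int) := by
  have hdis : (l₀ : Int) = (array.length : Int) - 1 ∨ pvKey array p.length ((l₀ : Int) + 1) ≠ p := by
    by_cases h : (l₀ : Int) = (array.length : Int) - 1
    · exact Or.inl h
    · right
      rw [show (l₀ : Int) + 1 = ((l₀ + 1 : Nat) : Int) by omega]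
      exact hmax _ (by omega) (by omega)
  intro m
  induction m with
  | zero =>
    intro lo hi hm h0 hhi hll hlh
    have h1 : lo = (l₀ : Int) := by omega
    have h2 : hi = (l₀ : Int) := by omega
    subst h1; subst h2
    rw [last_eq _ _ _ _ (by omega)]
    have hb := PySem.Int.floordiv_two_mid_bounds (le_refl (l₀ : Int))
    have hmid : PySem.Int.floordiv ((l₀ : Int) + (l₀ : Int)) 2 = (l₀ : Int) := by omega
    rw [hmid, if_pos ⟨hdis, hl⟩]
  | succ m ih =>
    intro lo hi hm h0 hhi hll hlh
    rw [last_eq _ _ _ _ (by omega)]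
    have hb := PySem.Int.floordiv_two_mid_bounds (show lo ≤ hi by omega)
    set md := PySem.Int.floordiv (lo + hi) 2 with hmd
    by_cases hc : (md = (array.length : Int) - 1 ∨ pvKey array p.length (md + 1) ≠ p) ∧
        pvKey array p.length md = p
    · rw [if_pos hc]
      have hml : md ≤ (l₀ : Int) := by
        by_contra hlt
        push_neg at hlt
        have : pvKey array p.length md ≠ p := by
          rw [show md = ((md.toNat : Nat) : Int) by omega]
          exact hmax md.toNat (by omega) (by omega)
        exact this hc.2
      rcases eq_or_lt_of_le hml with heq | hlt
      · rw [heq]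
      · exfalso
        rcases hc.1 with h | hne
        · omega
        · have h1 := pvKey_mono array p.length hs md (md + 1) (by omega) (by omega) (by omega)
          have h2 := pvKey_mono array p.length hs (md + 1) (l₀ : Int) (by omega) (by omega) (by omega)
          rw [hc.2] at h1
          rw [hl] at h2
          exact hne (le_antisymm h2 h1)
    · rw [if_neg hc]
      by_cases hg : p < pvKey array p.length md
      · rw [if_pos hg]
        have hlt : (l₀ : Int) < md := by
          by_contra hge
          push_neg at hge
          have hmono := pvKey_mono array p.length hs md (l₀ : Int) (by omega) hge (by omega)
          rw [hl] at hmono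
          exact absurd hmono (not_le.mpr hg)
        exact ih lo (md - 1) (by omega) h0 (by omega) hll (by omega)
      · rw [if_neg hg]
        have hlt : md < (l₀ : Int) := by
          rcases lt_trichotomy md (l₀ : Int) with h | h | h
          · exact h
          · exact absurd ⟨h ▸ hdis, h ▸ hl⟩ hc
          · exfalso
            have hmono := pvKey_mono array p.length hs (l₀ : Int) md (by omega) (by omega) (by omega)
            rw [hl] at hmono
            have heq : pvKey array p.length md = p := le_antisymm (not_lt.mp hg) hmono
            rw [show md = ((md.toNat : Nat) : Int) by omega] at heq
            exact hmax md.toNat (by omega) (by omega) heq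
        exact ih (md + 1) hi (by omega) (by omega) hhi (by omega) hlh

-- ===== counting =====
lemma countP_eq_range {α : Type} (d : α) :
    ∀ (l : List α) (Q : α → Bool),
      l.countP Q = (List.range l.length).countP (fun i => Q (l.getD i d)) := by
  intro l
  induction l with
  | nil => simp
  | cons a l ih =>
    intro Q
    simp only [List.length_cons, List.range_succ_eq_map, List.countP_cons, List.countP_map,
      List.getD_cons_zero, List.getD_cons_succ, Function.comp_def]
    rw [ih Q]

lemma count_ge : ∀ (n a : Nat), (List.range n).countP (fun i => decide (a ≤ i)) = n - a := by
  intro n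
  induction n with
  | zero => simp
  | succ n ih =>
    intro a
    rw [List.range_succ, List.countP_append, ih a]
    by_cases h : a ≤ n
    · simp [h]; omega
    · simp [h]; omega

lemma count_interval : ∀ (n a b : Nat), a ≤ b → b < n →
    (List.range n).countP (fun i => decide (a ≤ i ∧ i ≤ b)) = b - a + 1 := by
  intro n
  induction n with
  | zero => intro a b hab hbn; omega
  | succ n ih =>
    intro a b hab hbn
    rw [List.range_succ, List.countP_append]
    by_cases h : b < n
    · rw [ih a b hab h]
      have : ¬ (a ≤ n ∧ n ≤ b) := by omega
      simp [this]
    · have hb : b = n := by omega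
      subst hb
      have hcong : (List.range b).countP (fun i => decide (a ≤ i ∧ i ≤ b)) =
          (List.range b).countP (fun i => decide (a ≤ i)) := by
        apply List.countP_congr
        intro i hi
        rw [List.mem_range] at hi
        simp only [decide_eq_true_eq]
        constructor <;> (intro h2; first | exact h2.1 | exact ⟨h2, by omega⟩)
      rw [hcong, count_ge]
      simp
      omega

-- the foldl building target_notQuestionmark is a filter
lemma foldl_keep (l : List Char) : ∀ (acc : List Char),
    l.foldl (fun acc c => if c ≠ '?' then acc ++ [c] else acc) acc =
      acc ++ l.filter (fun c => c ≠ '?') := by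
  induction l with
  | nil => simp
  | cons a l ih =>
    intro acc
    by_cases h : a ≠ '?'
    · simp only [List.foldl_cons, if_pos h, ih, List.filter_cons]
      simp [h]
    · simp only [List.foldl_cons, if_neg h, ih, List.filter_cons]
      simp at h
      simp [h]

lemma main_eq (array : List String) (target : String)
    (hpre : Pre_find_keyword_EndQuestionmark array target) :
    find_keyword_EndQuestionmark array target = find_keyword_EndQuestionmark_alt array target := by
  unfold Pre_find_keyword_EndQuestionmark at hpre
  unfold find_keyword_EndQuestionmark find_keyword_EndQuestionmark_alt
  simp only [foldl_keep, List.nil_append] at *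
  set p : List Char := target.toList.filter (fun c => c ≠ '?') with hp
  by_cases hp0 : p = []
  · -- empty prefix: A returns len(array) (0 if empty), B counts every entry
    rw [hp0]
    by_cases hn : array.length = 0
    · rw [first_base _ _ _ _ (by omega)]
      simp [List.length_eq_zero_iff.mp hn]
    · rw [first_empty array ((array.length : Int) - 1).toNat _ (le_refl _) (by omega),
        last_empty array ((array.length : Int) - 1 - 0).toNat 0 (le_refl _) (by omega) (by omega)]
      simp
  · have hmatch_cases : (∀ w ∈ array, w.toList.take p.length ≠ p) ∨
        List.Pairwise (fun x y : String => x.toList ≤ y.toList) array := by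
      rcases hpre with h | h | h
      · exact absurd h hp0
      · exact Or.inl h
      · exact Or.inr h
    by_cases hex : ∃ w ∈ array, w.toList.take p.length = p
    · -- a match exists: Pre_ forces the array to be sorted
      have hsort : List.Pairwise (fun x y : String => x.toList ≤ y.toList) array := by
        rcases hmatch_cases with h | h
        · obtain ⟨w, hw1, hw2⟩ := hex
          exact absurd hw2 (h w hw1)
        · exact h
      obtain ⟨w, hwmem, hwtake⟩ := hex
      obtain ⟨k, hk, hak⟩ := List.mem_iff_getElem.mp hwmem
      have hM : pvKey array p.length (k : Int) = p := by
        rw [pvKey_inrange array p.length (k : Int) (by omega) (by omega)]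
        simp only [Int.toNat_natCast]
        rw [hak]
        exact hwtake
      have hEx : ∃ j : Nat, pvKey array p.length (j : Int) = p := ⟨k, hM⟩
      set f₀ : Nat := Nat.find hEx with hf₀
      have hf : pvKey array p.length (f₀ : Int) = p := Nat.find_spec hEx
      have hmin : ∀ j : Nat, j < f₀ → pvKey array p.length (j : Int) ≠ p :=
        fun j hj => Nat.find_min hEx hj
      set l₀ : Nat := Nat.findGreatest (fun j => pvKey array p.length (j : Int) = p)
        (array.length - 1) with hl₀
      have hl : pvKey array p.length (l₀ : Int) = p := by
        have h := Nat.findGreatest_spec (P := fun j => pvKey array p.length (j : Int) = p)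
          (show k ≤ array.length - 1 by omega) hM
        rwa [← hl₀] at h
      have hmax : ∀ j : Nat, l₀ < j → j < array.length → pvKey array p.length (j : Int) ≠ p :=
        fun j h1 h2 => Nat.findGreatest_is_greatest h1 (by omega)
      have hle : l₀ ≤ array.length - 1 := Nat.findGreatest_le _
      have hfl : f₀ ≤ l₀ := Nat.find_min' hEx hl
      have hfn : f₀ < array.length := by omega
      rw [first_found array p f₀ hsort hf hmin (by omega)
            ((array.length : Int) - 1 - 0).toNat 0 ((array.length : Int) - 1)
            (le_refl _) (by omega) (by omega) (by omega) (by omega),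
          last_found array p l₀ hsort hl hmax (by omega)
            ((array.length : Int) - 1 - 0).toNat 0 ((array.length : Int) - 1)
            (le_refl _) (by omega) (by omega) (by omega) (by omega)]
      have hcount : array.countP (fun w => w.toList.take p.length == p) = l₀ - f₀ + 1 := by
        rw [countP_eq_range "" array]
        have hcong : (List.range array.length).countP
              (fun i => (array.getD i "").toList.take p.length == p) =
            (List.range array.length).countP (fun i => decide (f₀ ≤ i ∧ i ≤ l₀)) := by
          apply List.countP_congr
          intro i hi
          rw [List.mem_range] at hi
          have hgd : array.getD i "" = array[i]'hi := by
            rw [List.getD_eq_getElem?_getD, List.getElem?_eq_getElem hi]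
            rfl
          have hkey : pvKey array p.length (i : Int) = (array[i]'hi).toList.take p.length := by
            rw [pvKey_inrange array p.length (i : Int) (by omega) (by omega)]
            simp
          simp only [hgd, beq_iff_eq, decide_eq_true_eq]
          constructor
          · intro hm
            have hMi : pvKey array p.length (i : Int) = p := by rw [hkey]; exact hm
            refine ⟨Nat.find_min' hEx hMi, ?_⟩
            by_contra hgt
            exact hmax i (by omega) hi hMi
          · intro ⟨h1, h2⟩
            have ha := pvKey_mono array p.length hsort (f₀ : Int) (i : Int)
              (by omega) (by omega) (by omega)
            have hb := pvKey_mono array p.length hsort (i : Int) (l₀ : Int)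
              (by omega) (by omega) (by omega)
            rw [hf] at ha
            rw [hl] at hb
            rw [← hkey]
            exact le_antisymm hb ha
        rw [hcong, count_interval array.length f₀ l₀ hfl (by omega)]
      simp only [hcount]
      push_cast [hfl]
      ring
    · -- no entry matches: A's first search fails, B counts nothing
      have hnm : ∀ w ∈ array, w.toList.take p.length ≠ p := by
        intro w hw
        by_contra h
        exact hex ⟨w, hw, h⟩
      have hnm' : ∀ i : Int, pvKey array p.length i ≠ p := by
        intro i heq
        unfold pvKey at heq
        cases hg : PySem.List.pyGet? array i with
        | none => rw [hg] at heq; simp at heq; exact hp0 heq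
        | some w => rw [hg] at heq; exact hnm w (pyGet?_mem array i w hg) heq
      rw [first_nomatch array p hnm' ((array.length : Int) - 1 - 0 + 1).toNat 0
        ((array.length : Int) - 1) (le_refl _)]
      have : array.countP (fun w => w.toList.take p.length == p) = 0 :=
        List.countP_eq_zero.mpr (fun w hw => by simpa using hnm w hw)
      simp [this]

-- ===== VERDICT (by name: the statement is the Claim_ definition above) =====
theorem find_keyword_EndQuestionmark_spec : Claim_equal_find_keyword_EndQuestionmark := by
  intro array target _hdom hpre
  unfold Spec_find_keyword_EndQuestionmark
  exact main_eq array target hpre
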